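-- pv_equiv track=rewrite | github.com/NIHARPUMBHADIYA/Ronin-AI | src/modules/mission_support.py | _extract_log_category
-- ===== SOURCE A (Python) =====
-- def _extract_log_category(query_text: str) -> str:
--     """Extract log category from query."""
--     if any(word in query_text for word in ['oxygen', 'pressure', 'temperature', 'life support']):
--         return 'LIFE_SUPPORT'
--     elif any(word in query_text for word in ['fuel', 'power', 'battery', 'energy']):
--         return 'POWER_SYSTEMS'
--     elif any(word in query_text for word in ['navigation', 'position', 'orbit']):
--         return 'NAVIGATION'
--     elif any(word in query_text for word in ['communication', 'radio', 'contact']):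
--         return 'COMMUNICATION'
--     elif any(word in query_text for word in ['experiment', 'research', 'science']):
--         return 'SCIENCE'
--     else:
--         return 'GENERAL'
-- ===== SOURCE B (Python) =====
-- _KEYWORD_PRIORITY = [
--     ('oxygen', 0), ('pressure', 0), ('temperature', 0), ('life support', 0),
--     ('fuel', 1), ('power', 1), ('battery', 1), ('energy', 1),
--     ('navigation', 2), ('position', 2), ('orbit', 2),
--     ('communication', 3), ('radio', 3), ('contact', 3),
--     ('experiment', 4), ('research', 4), ('science', 4),
-- ]
-- _LABELS = ['LIFE_SUPPORT', 'POWER_SYSTEMS', 'NAVIGATION', 'COMMUNICATION', 'SCIENCE', 'GENERAL']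
--
--
-- def _extract_log_category(query_text: str) -> str:
--     """Sweep every start position of the query once, keeping the smallest
--     priority of any keyword that begins there; the priority indexes the labels."""
--     best = 5
--     for i in range(len(query_text) + 1):
--         suffix = query_text[i:]
--         for kw, priority in _KEYWORD_PRIORITY:
--             if priority < best and suffix.startswith(kw):
--                 best = priority
--     return _LABELS[best]
-- ===== Notes on version B (the rewrite author's own statement) =====
-- stated objective: alternative
-- what changed: Replaces A's if/elif chain of per-category substring tests by a single sweep over every start position of the query that records the minimum priority of any keyword beginning there, then indexes a label table with that minimum (an explicit sweep; slower in CPython than the built-in substring search).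
import Mathlib
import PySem

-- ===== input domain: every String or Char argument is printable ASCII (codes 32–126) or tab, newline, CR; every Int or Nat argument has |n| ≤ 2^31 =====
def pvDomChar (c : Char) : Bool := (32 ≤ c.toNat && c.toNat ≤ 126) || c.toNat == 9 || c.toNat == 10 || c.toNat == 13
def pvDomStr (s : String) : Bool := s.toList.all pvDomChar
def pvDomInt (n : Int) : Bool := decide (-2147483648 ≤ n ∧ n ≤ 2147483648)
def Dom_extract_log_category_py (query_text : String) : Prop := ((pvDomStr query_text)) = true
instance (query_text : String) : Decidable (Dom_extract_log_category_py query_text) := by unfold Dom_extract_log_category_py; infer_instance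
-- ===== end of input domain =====

-- B replaces A's if/elif chain of substring tests by a single sweep over all start positions of the query that keeps the minimum priority of any keyword beginning there, then indexes a label table (alternative algorithm; not faster).


-- ===== PORT A =====
def extract_log_category_py (query_text : String) : String :=
  if ["oxygen", "pressure", "temperature", "life support"].any (fun word => PySem.Str.isIn word query_text) then
    "LIFE_SUPPORT"
  else if ["fuel", "power", "battery", "energy"].any (fun word => PySem.Str.isIn word query_text) then
    "POWER_SYSTEMS"
  else if ["navigation", "position", "orbit"].any (fun word => PySem.Str.isIn word query_text) then
    "NAVIGATION"
  else if ["communication", "radio", "contact"].any (fun word => PySem.Str.isIn word query_text) then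
    "COMMUNICATION"
  else if ["experiment", "research", "science"].any (fun word => PySem.Str.isIn word query_text) then
    "SCIENCE"
  else
    "GENERAL"

-- ===== PORT B =====
def pvKeywordPriority : List (List Char × Nat) :=
  [("oxygen".toList, 0), ("pressure".toList, 0), ("temperature".toList, 0), ("life support".toList, 0),
   ("fuel".toList, 1), ("power".toList, 1), ("battery".toList, 1), ("energy".toList, 1),
   ("navigation".toList, 2), ("position".toList, 2), ("orbit".toList, 2),
   ("communication".toList, 3), ("radio".toList, 3), ("contact".toList, 3),
   ("experiment".toList, 4), ("research".toList, 4), ("science".toList, 4)]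

def pvLabels : List String :=
  ["LIFE_SUPPORT", "POWER_SYSTEMS", "NAVIGATION", "COMMUNICATION", "SCIENCE", "GENERAL"]

-- inner loop of Source B: one start position, update best over all keywords
def pvInner (suffix : List Char) (best : Nat) : Nat :=
  pvKeywordPriority.foldl
    (fun best kp => if kp.2 < best ∧ PySem.Chars.startswith suffix kp.1 then kp.2 else best) best

-- outer loop: range(len+1); query_text[i:] for 0 ≤ i ≤ len is exactly .drop i on the code points
def pvSweep (cs : List Char) : Nat :=
  (List.range (cs.length + 1)).foldl (fun best i => pvInner (cs.drop i) best) 5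

def extract_log_category_py_alt (query_text : String) : String :=
  pvLabels.getD (pvSweep query_text.toList) "GENERAL"

-- ===== PRECONDITION & SPEC =====
def Spec_extract_log_category_py (query_text : String) (out : String) : Prop := out = extract_log_category_py_alt query_text
instance (query_text : String) (out : String) : Decidable (Spec_extract_log_category_py query_text out) := by unfold Spec_extract_log_category_py; infer_instance

-- ===== CLAIM =====
def Claim_equal_extract_log_category_py : Prop := ∀ (query_text : String), Dom_extract_log_category_py query_text → Spec_extract_log_category_py query_text (extract_log_category_py query_text)

-- ===== LEMMAS AND PROOFS =====

-- the inner fold never increases best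
lemma pvFold_le (L : List (List Char × Nat)) (s : List Char) (b : Nat) :
    L.foldl (fun best kp => if kp.2 < best ∧ PySem.Chars.startswith s kp.1 then kp.2 else best) b ≤ b := by
  induction L generalizing b with
  | nil => simp
  | cons hd tl ih =>
      simp only [List.foldl_cons]
      refine le_trans (ih _) ?_
      split <;> omega

-- a matching keyword bounds the inner fold
lemma pvFold_le_of_mem (L : List (List Char × Nat)) (s : List Char) (b : Nat)
    (kp : List Char × Nat) (hm : kp ∈ L) (hs : PySem.Chars.startswith s kp.1 = true) :
    L.foldl (fun best kp => if kp.2 < best ∧ PySem.Chars.startswith s kp.1 then kp.2 else best) b ≤ kp.2 := by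
  induction L generalizing b with
  | nil => simp at hm
  | cons hd tl ih =>
      simp only [List.foldl_cons]
      rcases List.mem_cons.mp hm with h | h
      · subst h
        by_cases hlt : kp.2 < b
        · simp only [hlt, hs, and_true, if_pos]
          exact pvFold_le tl s kp.2
        · have : (if kp.2 < b ∧ PySem.Chars.startswith s kp.1 = true then kp.2 else b) = b := by
            simp [hlt]
          rw [this]
          exact le_trans (pvFold_le tl s b) (by omega)
      · exact ih _ h

-- the inner fold returns its seed or the priority of some matching keyword
lemma pvFold_cases (L : List (List Char × Nat)) (s : List Char) (b : Nat) :
    L.foldl (fun best kp => if kp.2 < best ∧ PySem.Chars.startswith s kp.1 then kp.2 else best) b = b ∨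
    ∃ kp ∈ L, PySem.Chars.startswith s kp.1 = true ∧
      L.foldl (fun best kp => if kp.2 < best ∧ PySem.Chars.startswith s kp.1 then kp.2 else best) b = kp.2 := by
  induction L generalizing b with
  | nil => simp
  | cons hd tl ih =>
      simp only [List.foldl_cons]
      by_cases hc : hd.2 < b ∧ PySem.Chars.startswith s hd.1 = true
      · rcases ih hd.2 with h | ⟨kp, hm, hs, h⟩
        · right
          exact ⟨hd, List.mem_cons_self, hc.2, by simp [hc, h]⟩
        · right
          exact ⟨kp, List.mem_cons_of_mem _ hm, hs, by simp [hc, h]⟩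
      · have hb : (if hd.2 < b ∧ PySem.Chars.startswith s hd.1 = true then hd.2 else b) = b := by
          simp [hc]
        rw [hb]
        rcases ih b with h | ⟨kp, hm, hs, h⟩
        · exact Or.inl h
        · exact Or.inr ⟨kp, List.mem_cons_of_mem _ hm, hs, h⟩

-- outer-loop versions of the three facts
lemma pvOuter_le (I : List Nat) (cs : List Char) (b : Nat) :
    I.foldl (fun best i => pvInner (cs.drop i) best) b ≤ b := by
  induction I generalizing b with
  | nil => simp
  | cons hd tl ih =>
      simp only [List.foldl_cons]
      exact le_trans (ih _) (pvFold_le _ _ _)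

lemma pvOuter_le_of_mem (I : List Nat) (cs : List Char) (b : Nat)
    (i : Nat) (hi : i ∈ I) (kp : List Char × Nat) (hm : kp ∈ pvKeywordPriority)
    (hs : PySem.Chars.startswith (cs.drop i) kp.1 = true) :
    I.foldl (fun best i => pvInner (cs.drop i) best) b ≤ kp.2 := by
  induction I generalizing b with
  | nil => simp at hi
  | cons hd tl ih =>
      simp only [List.foldl_cons]
      rcases List.mem_cons.mp hi with h | h
      · subst h
        exact le_trans (pvOuter_le tl cs _) (pvFold_le_of_mem _ _ _ kp hm hs)
      · exact ih _ h

lemma pvOuter_cases (I : List Nat) (cs : List Char) (b : Nat) :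
    I.foldl (fun best i => pvInner (cs.drop i) best) b = b ∨
    ∃ i ∈ I, ∃ kp ∈ pvKeywordPriority, PySem.Chars.startswith (cs.drop i) kp.1 = true ∧
      I.foldl (fun best i => pvInner (cs.drop i) best) b = kp.2 := by
  induction I generalizing b with
  | nil => simp
  | cons hd tl ih =>
      simp only [List.foldl_cons]
      rcases pvFold_cases pvKeywordPriority (cs.drop hd) b with h | ⟨kp, hm, hs, h⟩
      · rcases ih (pvInner (cs.drop hd) b) with h2 | ⟨i, hi, kp, hm, hs, h2⟩
        · left; rw [h2]; exact h
        · exact Or.inr ⟨i, List.mem_cons_of_mem _ hi, kp, hm, hs, h2⟩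
      · rcases ih (pvInner (cs.drop hd) b) with h2 | ⟨i, hi, kp2, hm2, hs2, h2⟩
        · right
          refine ⟨hd, List.mem_cons_self, kp, hm, hs, ?_⟩
          rw [h2]; exact h
        · exact Or.inr ⟨i, List.mem_cons_of_mem _ hi, kp2, hm2, hs2, h2⟩

lemma pvKeywords_ne_nil : ∀ kp ∈ pvKeywordPriority, kp.1 ≠ [] := by decide

-- sweep is bounded by the priority of any keyword occurring in the text
lemma pvSweep_le (cs : List Char) (kp : List Char × Nat) (hm : kp ∈ pvKeywordPriority)
    (h : PySem.Chars.isIn kp.1 cs = true) : pvSweep cs ≤ kp.2 := by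
  obtain ⟨j, hj⟩ := (PySem.Chars.exists_prefix_drop_iff_isIn kp.1 cs).mpr h
  have hjlt : j < cs.length + 1 := by
    by_contra hge
    have : cs.drop j = [] := List.drop_eq_nil_of_le (by omega)
    rw [this] at hj
    exact pvKeywords_ne_nil kp hm (List.prefix_nil.mp hj)
  exact pvOuter_le_of_mem _ cs 5 j (List.mem_range.mpr hjlt) kp hm
    ((PySem.Chars.startswith_iff _ _).mpr hj)

-- sweep result is 5 or the priority of some keyword occurring in the text
lemma pvSweep_cases (cs : List Char) :
    pvSweep cs = 5 ∨ ∃ kp ∈ pvKeywordPriority, PySem.Chars.isIn kp.1 cs = true ∧ pvSweep cs = kp.2 := by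
  rcases pvOuter_cases (List.range (cs.length + 1)) cs 5 with h | ⟨i, _, kp, hm, hs, h⟩
  · exact Or.inl h
  · right
    refine ⟨kp, hm, ?_, h⟩
    exact (PySem.Chars.exists_prefix_drop_iff_isIn kp.1 cs).mp
      ⟨i, (PySem.Chars.startswith_iff _ _).mp hs⟩

-- the sweep never exceeds its seed 5
lemma pvSweep_le_five (cs : List Char) : pvSweep cs ≤ 5 := pvOuter_le _ cs 5

-- if every keyword of priority < j is absent from the text, the sweep is at least j
lemma pvSweep_ge (cs : List Char) (j : Nat) (hj : j ≤ 5)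
    (h : ∀ kp ∈ pvKeywordPriority, kp.2 < j → PySem.Chars.isIn kp.1 cs = false) :
    j ≤ pvSweep cs := by
  rcases pvSweep_cases cs with h5 | ⟨kp, hm, hin, hR⟩
  · omega
  · by_contra hlt
    rw [Nat.not_le] at hlt
    rw [hR] at hlt
    rw [h kp hm hlt] at hin
    exact absurd hin (by simp)

-- ===== VERDICT =====
set_option maxHeartbeats 2000000 in
theorem extract_log_category_py_spec : Claim_equal_extract_log_category_py := by
  intro q _
  unfold Spec_extract_log_category_py extract_log_category_py extract_log_category_py_alt
  set cs := q.toList with hcs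
  have hle := pvSweep_le cs
  simp only [List.any_cons, List.any_nil, Bool.or_false, Bool.or_eq_true,
    PySem.Str.isIn_eq, ← hcs]
  by_cases h0 : PySem.Chars.isIn "oxygen".toList cs = true ∨ PySem.Chars.isIn "pressure".toList cs = true ∨ PySem.Chars.isIn "temperature".toList cs = true ∨ PySem.Chars.isIn "life support".toList cs = true
  · have hR : pvSweep cs = 0 := by
      have hub : pvSweep cs ≤ 0 := by
        rcases h0 with h | h | h | h
        · exact hle ("oxygen".toList, 0) (by simp [pvKeywordPriority]) h
        · exact hle ("pressure".toList, 0) (by simp [pvKeywordPriority]) h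
        · exact hle ("temperature".toList, 0) (by simp [pvKeywordPriority]) h
        · exact hle ("life support".toList, 0) (by simp [pvKeywordPriority]) h
      omega
    rw [if_pos h0, hR]
    rfl
  · by_cases h1 : PySem.Chars.isIn "fuel".toList cs = true ∨ PySem.Chars.isIn "power".toList cs = true ∨ PySem.Chars.isIn "battery".toList cs = true ∨ PySem.Chars.isIn "energy".toList cs = true
    · have hR : pvSweep cs = 1 := by
        have hub : pvSweep cs ≤ 1 := by
          rcases h1 with h | h | h | h
          · exact hle ("fuel".toList, 1) (by simp [pvKeywordPriority]) h
          · exact hle ("power".toList, 1) (by simp [pvKeywordPriority]) h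
          · exact hle ("battery".toList, 1) (by simp [pvKeywordPriority]) h
          · exact hle ("energy".toList, 1) (by simp [pvKeywordPriority]) h
        have hlb : 1 ≤ pvSweep cs := by
          refine pvSweep_ge cs 1 (by omega) ?_
          intro kp hm hlt
          fin_cases hm <;> simp_all
        omega
      rw [if_neg h0]; rw [if_pos h1, hR]
      rfl
    · by_cases h2 : PySem.Chars.isIn "navigation".toList cs = true ∨ PySem.Chars.isIn "position".toList cs = true ∨ PySem.Chars.isIn "orbit".toList cs = true
      · have hR : pvSweep cs = 2 := by
          have hub : pvSweep cs ≤ 2 := by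
            rcases h2 with h | h | h
            · exact hle ("navigation".toList, 2) (by simp [pvKeywordPriority]) h
            · exact hle ("position".toList, 2) (by simp [pvKeywordPriority]) h
            · exact hle ("orbit".toList, 2) (by simp [pvKeywordPriority]) h
          have hlb : 2 ≤ pvSweep cs := by
            refine pvSweep_ge cs 2 (by omega) ?_
            intro kp hm hlt
            fin_cases hm <;> simp_all
          omega
        rw [if_neg h0]; rw [if_neg h1]; rw [if_pos h2, hR]
        rfl
      · by_cases h3 : PySem.Chars.isIn "communication".toList cs = true ∨ PySem.Chars.isIn "radio".toList cs = true ∨ PySem.Chars.isIn "contact".toList cs = true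
        · have hR : pvSweep cs = 3 := by
            have hub : pvSweep cs ≤ 3 := by
              rcases h3 with h | h | h
              · exact hle ("communication".toList, 3) (by simp [pvKeywordPriority]) h
              · exact hle ("radio".toList, 3) (by simp [pvKeywordPriority]) h
              · exact hle ("contact".toList, 3) (by simp [pvKeywordPriority]) h
            have hlb : 3 ≤ pvSweep cs := by
              refine pvSweep_ge cs 3 (by omega) ?_
              intro kp hm hlt
              fin_cases hm <;> simp_all
            omega
          rw [if_neg h0]; rw [if_neg h1]; rw [if_neg h2]; rw [if_pos h3, hR]
          rfl
        · by_cases h4 : PySem.Chars.isIn "experiment".toList cs = true ∨ PySem.Chars.isIn "research".toList cs = true ∨ PySem.Chars.isIn "science".toList cs = true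
          · have hR : pvSweep cs = 4 := by
              have hub : pvSweep cs ≤ 4 := by
                rcases h4 with h | h | h
                · exact hle ("experiment".toList, 4) (by simp [pvKeywordPriority]) h
                · exact hle ("research".toList, 4) (by simp [pvKeywordPriority]) h
                · exact hle ("science".toList, 4) (by simp [pvKeywordPriority]) h
              have hlb : 4 ≤ pvSweep cs := by
                refine pvSweep_ge cs 4 (by omega) ?_
                intro kp hm hlt
                fin_cases hm <;> simp_all
              omega
            rw [if_neg h0]; rw [if_neg h1]; rw [if_neg h2]; rw [if_neg h3]; rw [if_pos h4, hR]
            rfl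
          · have hR : pvSweep cs = 5 := by
              have hlb : 5 ≤ pvSweep cs := by
                refine pvSweep_ge cs 5 (by omega) ?_
                intro kp hm hlt
                fin_cases hm <;> simp_all
              have := pvSweep_le_five cs
              omega
            rw [if_neg h0]; rw [if_neg h1]; rw [if_neg h2]; rw [if_neg h3]; rw [if_neg h4]; rw [hR]
            rfl
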